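-- pv_equiv track=rewrite | github.com/chiragpatel1229/Cryptographic-RBGs-Development-and-Analysis | RBG_Test_suit/ALL_GDF_for_all_gap_calculation.py | cal_gaps
-- ===== SOURCE A (Python) =====
-- def cal_gaps(_sequence):
--     gap = []
--     gap_counter = 0
--     no_gap = 0                  # when we do not know the first bit is 1 or 0 so the condition is false
--
--     for bits in _sequence:
--         if bits == 0:
--             gap_counter += 1    # calculate the number of continued zeros between two ones
--         elif bits == 1:         # finds the 1s in a list start checking for no gaps.
--             if no_gap:          # if there are two continued 1s in a list then append the counter
--                 gap.append(gap_counter)  # add 0s in every step with no gap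
--             gap_counter = 0     # Reset the counter
--             no_gap = 1          # found the no_gap in the list, it is true
--     return gap
-- ===== SOURCE B (Python) =====
-- def cal_gaps(_sequence):
--     # Index-table formulation: positions of the 1s, plus a prefix array of
--     # zero-counts; each gap is the difference of prefix counts at two
--     # consecutive one-positions (only 0-bits are counted, other values ignored).
--     ones = [i for i, b in enumerate(_sequence) if b == 1]
--     zeros = [0]
--     for b in _sequence:
--         zeros.append(zeros[-1] + (1 if b == 0 else 0))
--     return [zeros[ones[k + 1]] - zeros[ones[k]] for k in range(len(ones) - 1)]
-- ===== Notes on version B (the rewrite author's own statement) =====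
-- stated objective: alternative
-- what changed: replaces A's single stateful scan (running gap counter + seen-a-one flag) by an index-table construction: collect the indices of 1-bits and a prefix array of zero-counts, then emit the difference of prefix counts at each pair of consecutive one-indices
import Mathlib
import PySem

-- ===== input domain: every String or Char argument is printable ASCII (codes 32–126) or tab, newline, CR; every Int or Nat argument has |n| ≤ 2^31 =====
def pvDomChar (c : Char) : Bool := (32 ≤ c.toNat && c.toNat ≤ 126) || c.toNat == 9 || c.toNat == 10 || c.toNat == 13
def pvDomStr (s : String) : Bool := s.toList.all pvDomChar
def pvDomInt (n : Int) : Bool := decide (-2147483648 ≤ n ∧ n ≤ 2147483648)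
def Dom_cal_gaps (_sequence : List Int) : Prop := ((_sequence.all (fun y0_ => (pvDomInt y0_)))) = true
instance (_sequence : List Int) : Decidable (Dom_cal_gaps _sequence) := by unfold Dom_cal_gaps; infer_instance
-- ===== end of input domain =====

-- B replaces A's single stateful scan by an index table: one-positions plus a
-- prefix array of zero-counts, gaps = differences of prefix counts (alternative
-- decomposition, same asymptotic cost).


-- ===== PORT A =====
-- state: (gap, gap_counter, no_gap); no_gap kept as a Python int (truthiness `≠ 0`)
def calStep (st : List Int × Int × Int) (bits : Int) : List Int × Int × Int :=
  if bits = 0 then (st.1, st.2.1 + 1, st.2.2)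
  else if bits = 1 then ((if st.2.2 ≠ 0 then st.1 ++ [st.2.1] else st.1), 0, 1)
  else st

def cal_gaps (_sequence : List Int) : List Int :=
  (_sequence.foldl calStep ([], 0, 0)).1

-- ===== PORT B =====
def cal_gaps_alt (_sequence : List Int) : List Int :=
  let ones : List Int :=
    (PySem.List.enumerate _sequence 0).filterMap (fun p => if p.2 = 1 then some p.1 else none)
  let zeros : List Int :=
    _sequence.foldl (fun zs b => zs ++ [PySem.List.pyGetD zs (-1) 0 + (if b = 0 then 1 else 0)]) [0]
  (List.range (ones.length - 1)).map (fun (k : Nat) =>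
    PySem.List.pyGetD zeros (PySem.List.pyGetD ones ((k : Int) + 1) 0) 0
      - PySem.List.pyGetD zeros (PySem.List.pyGetD ones ((k : Int)) 0) 0)

-- ===== PRECONDITION & SPEC =====
def Spec_cal_gaps (_sequence : List Int) (out : List Int) : Prop := out = cal_gaps_alt _sequence
instance (_sequence : List Int) (out : List Int) : Decidable (Spec_cal_gaps _sequence out) := by unfold Spec_cal_gaps; infer_instance

-- ===== CLAIM (what is proved, stated in full; the proofs are below) =====
def Claim_equal_cal_gaps : Prop := ∀ (_sequence : List Int), Dom_cal_gaps _sequence → Spec_cal_gaps _sequence (cal_gaps _sequence)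

-- ===== LEMMAS AND PROOFS =====

-- zero count as an Int
def zc (l : List Int) : Int := (l.count 0 : Int)

-- positions of the 1-bits
def onesPos : List Int → List Nat
  | [] => []
  | b :: r => if b = 1 then 0 :: (onesPos r).map (· + 1) else (onesPos r).map (· + 1)

-- combine adjacent pairs
def adjMap {α β : Type} (g : α → α → β) : List α → List β
  | [] => []
  | [_] => []
  | x :: y :: t => g x y :: adjMap g (y :: t)

-- reference recursion: A's behaviour
def gapsAux : List Int → Int → List Int
  | [], _ => []
  | b :: r, c => if b = 0 then gapsAux r (c + 1) else if b = 1 then c :: gapsAux r 0 else gapsAux r c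

def gapsSpec : List Int → List Int
  | [] => []
  | b :: r => if b = 1 then gapsAux r 0 else gapsSpec r

def pdHead (c : Int) (f : Nat → Int) : List Nat → List Int
  | [] => []
  | x :: t => (c + f x) :: adjMap (fun a b => f b - f a) (x :: t)

theorem zc_cons (b : Int) (t : List Int) : zc (b :: t) = (if b = 0 then 1 else 0) + zc t := by
  by_cases h : b = 0 <;> simp [zc, List.count_cons, h] <;> push_cast <;> ring

theorem zc_nil : zc [] = 0 := by simp [zc]

-- A side
theorem foldA_one (l : List Int) (gap : List Int) (gc : Int) :
    (l.foldl calStep (gap, gc, 1)).1 = gap ++ gapsAux l gc := by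
  induction l generalizing gap gc with
  | nil => simp [gapsAux]
  | cons b r ih =>
    by_cases h0 : b = 0
    · simp [h0, calStep, gapsAux, ih]
    · by_cases h1 : b = 1
      · simp [h0, h1, calStep, gapsAux, ih]
      · simp [h0, h1, calStep, gapsAux, ih]

theorem foldA_zero (l : List Int) (gap : List Int) (gc : Int) :
    (l.foldl calStep (gap, gc, 0)).1 = gap ++ gapsSpec l := by
  induction l generalizing gc with
  | nil => simp [gapsSpec]
  | cons b r ih =>
    by_cases h0 : b = 0
    · simp [h0, calStep, gapsSpec, ih]
    · by_cases h1 : b = 1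
      · simp [h0, h1, calStep, gapsSpec, foldA_one]
      · simp [h0, h1, calStep, gapsSpec, ih]

theorem cal_gaps_eq_spec (l : List Int) : cal_gaps l = gapsSpec l := by
  simp [cal_gaps, foldA_zero]

-- B side helpers
theorem adjMap_map {α β γ : Type} (g : α → α → β) (h : γ → α) (xs : List γ) :
    adjMap g (xs.map h) = adjMap (fun a b => g (h a) (h b)) xs := by
  induction xs with
  | nil => simp [adjMap]
  | cons x t ih =>
    cases t with
    | nil => simp [adjMap]
    | cons y t' => simpa [adjMap] using ih

theorem adjMap_congr {α β : Type} (g g' : α → α → β) (xs : List α)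
    (h : ∀ a ∈ xs, ∀ b ∈ xs, g a b = g' a b) : adjMap g xs = adjMap g' xs := by
  induction xs with
  | nil => simp [adjMap]
  | cons x t ih =>
    cases t with
    | nil => simp [adjMap]
    | cons y t' =>
      simp only [adjMap]
      exact congrArg₂ List.cons (h x (by simp) y (by simp))
        (ih (fun a ha b hb => h a (by simp [ha]) b (by simp [hb])))

theorem onesPos_lt (l : List Int) : ∀ j ∈ onesPos l, j < l.length := by
  induction l with
  | nil => simp [onesPos]
  | cons b r ih =>
    intro j hj
    simp only [onesPos] at hj
    split_ifs at hj with h1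
    · simp only [List.mem_cons, List.mem_map] at hj
      rcases hj with h | ⟨j', hj', hje⟩
      · simp [h]
      · have := ih j' hj'; simp; omega
    · simp only [List.mem_map] at hj
      obtain ⟨j', hj', hje⟩ := hj
      have := ih j' hj'; simp; omega

theorem ones_eq (l : List Int) (s : Int) :
    (PySem.List.enumerate l s).filterMap (fun p => if p.2 = 1 then some p.1 else none)
      = (onesPos l).map (fun (j : Nat) => s + (j : Int)) := by
  induction l generalizing s with
  | nil => simp [onesPos]
  | cons b r ih =>
    rw [PySem.List.enumerate_cons, List.filterMap_cons]
    by_cases h1 : b = 1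
    · rw [show onesPos (b :: r) = 0 :: (onesPos r).map (· + 1) from by simp [onesPos, h1]]
      simp only [h1, ih (s + 1), List.map_cons, List.map_map]
      refine congrArg₂ List.cons (by simp) ?_
      apply List.map_congr_left; intro j _
      simp [Function.comp]; push_cast; ring
    · rw [show onesPos (b :: r) = (onesPos r).map (· + 1) from by simp [onesPos, h1]]
      simp only [h1, ih (s + 1), List.map_map]
      apply List.map_congr_left; intro j _
      simp [Function.comp]; push_cast; ring

theorem zeros_fold (l : List Int) (zs : List Int) (x : Int) :
    l.foldl (fun zs b => zs ++ [PySem.List.pyGetD zs (-1) 0 + (if b = 0 then 1 else 0)]) (zs ++ [x])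
      = zs ++ [x] ++ (List.range l.length).map (fun i => x + zc (l.take (i + 1))) := by
  induction l generalizing zs x with
  | nil => simp
  | cons b r ih =>
    simp only [List.foldl_cons, PySem.List.pyGetD_neg_one_append_singleton]
    rw [show zs ++ [x] ++ [x + (if b = 0 then 1 else 0)] = (zs ++ [x]) ++ [x + (if b = 0 then 1 else 0)] by simp]
    rw [ih]
    simp only [List.length_cons, List.range_succ_eq_map, List.map_cons, List.map_map,
      List.append_assoc, List.singleton_append]
    refine congrArg (zs ++ ·) (congrArg (x :: ·) ?_)
    refine congrArg₂ List.cons (by simp [zc_cons, zc_nil]) ?_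
    apply List.map_congr_left; intro i _
    simp [Function.comp, List.take_succ_cons, zc_cons]
    ring

theorem zeros_eq (l : List Int) :
    l.foldl (fun zs b => zs ++ [PySem.List.pyGetD zs (-1) 0 + (if b = 0 then 1 else 0)]) [0]
      = (List.range (l.length + 1)).map (fun j => zc (l.take j)) := by
  have := zeros_fold l [] 0
  simp at this
  rw [this]
  simp [List.range_succ_eq_map, List.map_map, zc_nil, Function.comp]

theorem getD_range_map (f : Nat → Int) (m j : Nat) (h : j < m) :
    ((List.range m).map f).getD j 0 = f j := by
  simp [List.getD, h]

theorem range_map_adj {α β : Type} (xs : List α) (d : α) (g : α → α → β) :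
    (List.range (xs.length - 1)).map (fun k => g (xs.getD k d) (xs.getD (k + 1) d)) = adjMap g xs := by
  induction xs with
  | nil => simp [adjMap]
  | cons x t ih =>
    cases t with
    | nil => simp [adjMap]
    | cons y t' =>
      simp only [List.length_cons, Nat.add_sub_cancel, List.range_succ_eq_map, List.map_cons,
        List.map_map, adjMap]
      refine congrArg₂ List.cons (by simp [List.getD]) ?_
      rw [← ih]
      simp only [List.length_cons, Nat.add_sub_cancel]
      apply List.map_congr_left; intro k _
      simp [Function.comp]

theorem pdHead_shift (c e : Int) (f : Nat → Int) (xs : List Nat) :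
    pdHead c (fun j => e + f j) xs = pdHead (c + e) f xs := by
  cases xs with
  | nil => simp [pdHead]
  | cons x t =>
    simp only [pdHead]
    refine congrArg₂ List.cons (by ring) ?_
    have : (fun a b => (e + f b) - (e + f a)) = (fun a b => f b - f a) := by
      funext a b; ring
    rw [this]

theorem pdHead_map_succ (c : Int) (f : Nat → Int) (xs : List Nat) :
    pdHead c f (xs.map (· + 1)) = pdHead c (fun j => f (j + 1)) xs := by
  cases xs with
  | nil => simp [pdHead]
  | cons x t =>
    simp only [pdHead, List.map_cons]
    refine congrArg₂ List.cons rfl ?_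
    rw [show (x + 1) :: List.map (· + 1) t = (x :: t).map (· + 1) from by simp, adjMap_map]

theorem gapsAux_eq_pdHead (r : List Int) (c : Int) :
    gapsAux r c = pdHead c (fun j => zc (r.take j)) (onesPos r) := by
  induction r generalizing c with
  | nil => simp [gapsAux, onesPos, pdHead]
  | cons b r ih =>
    by_cases h0 : b = 0
    · rw [show gapsAux (b :: r) c = gapsAux r (c + 1) from by simp [gapsAux, h0]]
      rw [ih]
      rw [show onesPos (b :: r) = (onesPos r).map (· + 1) by simp [onesPos, h0]]
      rw [pdHead_map_succ]
      have : (fun j => zc ((b :: r).take (j + 1))) = (fun j => 1 + zc (r.take j)) := by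
        funext j; simp [List.take_succ_cons, zc_cons, h0]
      rw [this, pdHead_shift]
    · by_cases h1 : b = 1
      · rw [show gapsAux (b :: r) c = c :: gapsAux r 0 from by simp [gapsAux, h1]]
        rw [show onesPos (b :: r) = 0 :: (onesPos r).map (· + 1) by simp [onesPos, h1]]
        rw [ih]
        cases hx : onesPos r with
        | nil => simp [pdHead, hx, adjMap, zc]
        | cons x t =>
          simp only [pdHead, hx, List.map_cons, adjMap]
          refine congrArg₂ List.cons (by simp [zc_nil]) ?_
          refine congrArg₂ List.cons (by simp [List.take_succ_cons, zc_cons, h1, zc_nil]) ?_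
          rw [show (x + 1) :: List.map (· + 1) t = (x :: t).map (· + 1) from by simp, adjMap_map]
          apply adjMap_congr
          intro a _ b' _
          simp [List.take_succ_cons, zc_cons, h1]
      · rw [show gapsAux (b :: r) c = gapsAux r c by simp [gapsAux, h0, h1]]
        rw [ih]
        rw [show onesPos (b :: r) = (onesPos r).map (· + 1) by simp [onesPos, h1]]
        rw [pdHead_map_succ]
        have : (fun j => zc ((b :: r).take (j + 1))) = (fun j => zc (r.take j)) := by
          funext j; simp [List.take_succ_cons, zc_cons, h0]
        rw [this]

theorem adjMap_onesPos_eq_gapsSpec (l : List Int) :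
    adjMap (fun a b => zc (l.take b) - zc (l.take a)) (onesPos l) = gapsSpec l := by
  induction l with
  | nil => simp [onesPos, adjMap, gapsSpec]
  | cons b r ih =>
    by_cases h1 : b = 1
    · rw [show gapsSpec (b :: r) = gapsAux r 0 by simp [gapsSpec, h1]]
      rw [show onesPos (b :: r) = 0 :: (onesPos r).map (· + 1) by simp [onesPos, h1]]
      rw [gapsAux_eq_pdHead]
      cases hx : onesPos r with
      | nil => simp [pdHead, hx, adjMap]
      | cons x t =>
        simp only [pdHead, hx, List.map_cons, adjMap]
        refine congrArg₂ List.cons (by simp [List.take_succ_cons, zc_cons, h1, zc_nil]) ?_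
        rw [show (x + 1) :: List.map (· + 1) t = (x :: t).map (· + 1) from by simp, adjMap_map]
        apply adjMap_congr
        intro a _ b' _
        simp [List.take_succ_cons, zc_cons, h1]
    · rw [show gapsSpec (b :: r) = gapsSpec r by simp [gapsSpec, h1]]
      rw [show onesPos (b :: r) = (onesPos r).map (· + 1) by simp [onesPos, h1]]
      rw [adjMap_map, ← ih]
      apply adjMap_congr
      intro a _ b' _
      simp only [List.take_succ_cons, zc_cons]
      ring

theorem cal_gaps_alt_eq_spec (l : List Int) : cal_gaps_alt l = gapsSpec l := by
  unfold cal_gaps_alt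
  rw [ones_eq l 0, zeros_eq l]
  rw [show ((onesPos l).map (fun (j : Nat) => (0 : Int) + (j : Int)))
      = (onesPos l).map (fun (j : Nat) => (j : Int)) from by simp]
  have hmap : (List.range (((onesPos l).map (fun (j : Nat) => (j : Int))).length - 1)).map (fun (k : Nat) =>
      PySem.List.pyGetD ((List.range (l.length + 1)).map (fun j => zc (l.take j)))
        (PySem.List.pyGetD ((onesPos l).map (fun (j : Nat) => (j : Int))) ((k : Int) + 1) 0) 0
        - PySem.List.pyGetD ((List.range (l.length + 1)).map (fun j => zc (l.take j)))
        (PySem.List.pyGetD ((onesPos l).map (fun (j : Nat) => (j : Int))) ((k : Int)) 0) 0)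
    = adjMap (fun a b =>
        PySem.List.pyGetD ((List.range (l.length + 1)).map (fun j => zc (l.take j))) b 0
          - PySem.List.pyGetD ((List.range (l.length + 1)).map (fun j => zc (l.take j))) a 0)
        ((onesPos l).map (fun (j : Nat) => (j : Int))) := by
    rw [← range_map_adj ((onesPos l).map (fun (j : Nat) => (j : Int))) (0 : Int)]
    apply List.map_congr_left; intro k _
    rw [show ((k : Int) + 1) = ((k + 1 : Nat) : Int) from by push_cast; ring,
      PySem.List.pyGetD_natCast, PySem.List.pyGetD_natCast]
  rw [hmap, adjMap_map, ← adjMap_onesPos_eq_gapsSpec l]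
  apply adjMap_congr
  intro a ha b hb
  have hA := onesPos_lt l a ha
  have hB := onesPos_lt l b hb
  rw [PySem.List.pyGetD_natCast, PySem.List.pyGetD_natCast,
    getD_range_map _ _ _ (by omega), getD_range_map _ _ _ (by omega)]

-- ===== VERDICT (by name: the statement is the Claim_ definition above) =====
theorem cal_gaps_spec : Claim_equal_cal_gaps := by
  intro l _
  unfold Spec_cal_gaps
  rw [cal_gaps_eq_spec, cal_gaps_alt_eq_spec]
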